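-- pv_equiv track=rewrite | github.com/EliasSabja/IIC3253-Tareas | Tarea 2/Pregunta 2/pregunta2.py | tiene_raiz_entera
-- ===== SOURCE A (Python) =====
-- def exp(a: int, b: int) -> int:
--     if b == 0:
--         return 1
--     else:
--         res = 1
--         pot = a
--         while b > 0:
--             if b % 2 == 1:
--                 res = pot * res
--             b = b // 2
--             pot = pot * pot
--         return res
--
-- def tiene_raiz_entera(n: int, k: int) -> bool:
--     if n <= 3:
--         return False
--     else:
--         a = 1
--         while exp(a,k) < n:
--             a = 2*a
--         return tiene_raiz_entera_intervalo(n, k, a//2, a)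
--
-- def tiene_raiz_entera_intervalo(n: int, k: int, i: int, j: int) -> bool:
--     while i <= j:
--         if i==j:
--             return n == exp(i,k)
--         else:
--             p = (i + j)//2
--             val = exp(p,k)
--             if n == val:
--                 return True
--             elif val < n:
--                 i = p+1
--             else:
--                 j = p-1
--     return False
-- ===== SOURCE B (Python) =====
-- def tiene_raiz_entera(n: int, k: int) -> bool:
--     # Build the integer floor k-th root of n bit by bit (highest bit first),
--     # then test whether it is exact. A positive n > 3 can only be a k-th
--     # power for k >= 1.
--     if n <= 3 or k <= 0:
--         return False
--     r = 0
--     b = 1 << n.bit_length()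
--     while b:
--         if (r + b) ** k <= n:
--             r += b
--         b >>= 1
--     return r ** k == n
-- ===== Notes on version B (the rewrite author's own statement) =====
-- stated objective: simpler
-- what changed: Replaces A's three functions (fast-exponentiation helper, exponential doubling phase, interval binary search) with one short loop that constructs the floor k-th root bit by bit from the high bit down and tests it for exactness; inputs n > 3 with k <= 0, on which A's doubling loop never terminates, are excluded by Pre_ and B returns False there.
import Mathlib
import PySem

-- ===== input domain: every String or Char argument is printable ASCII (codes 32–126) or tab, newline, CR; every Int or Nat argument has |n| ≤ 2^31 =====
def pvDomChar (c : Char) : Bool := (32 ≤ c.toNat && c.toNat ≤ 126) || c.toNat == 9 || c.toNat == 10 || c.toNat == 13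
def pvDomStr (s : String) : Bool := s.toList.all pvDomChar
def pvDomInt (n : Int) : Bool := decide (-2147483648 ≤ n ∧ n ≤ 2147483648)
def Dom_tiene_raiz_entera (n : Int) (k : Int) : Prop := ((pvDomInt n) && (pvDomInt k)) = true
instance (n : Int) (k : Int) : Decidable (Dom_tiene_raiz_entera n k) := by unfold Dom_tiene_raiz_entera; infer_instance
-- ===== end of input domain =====

-- B replaces A's fast-exponentiation helper + doubling phase + interval binary search with one
-- loop building the floor k-th root bit by bit (objective: simpler, one short function).

-- ===== PORT A =====
-- exp's while-loop over the state (res, pot, b); stops when b ≤ 0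
def pvExpLoop (res pot b : Int) : Int :=
  if _h : 0 < b then
    pvExpLoop (if PySem.Int.mod b 2 = 1 then pot * res else res) (pot * pot) (PySem.Int.floordiv b 2)
  else res
termination_by b.toNat
decreasing_by
  have h2 : PySem.Int.floordiv b 2 = b / 2 := PySem.Int.floordiv_eq_ediv_of_pos (by omega)
  rw [h2]; omega

def pvExp (a b : Int) : Int :=
  if b = 0 then 1 else pvExpLoop 1 a b

-- tiene_raiz_entera_intervalo's while-loop
def pvIntervalo (n k i j : Int) : Bool :=
  if _h : i ≤ j then
    if i = j then decide (n = pvExp i k)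
    else
      let p := PySem.Int.floordiv (i + j) 2
      let val := pvExp p k
      if n = val then true
      else if val < n then pvIntervalo n k (p + 1) j
      else pvIntervalo n k i (p - 1)
  else false
termination_by (j - i).toNat
decreasing_by
  all_goals
    have hb := PySem.Int.floordiv_two_mid_bounds (lo := i) (hi := j) (by omega)
    omega

-- the doubling loop of tiene_raiz_entera; the conjuncts 1 ≤ a, 1 ≤ k, a < n only make the
-- recursion well-founded: they hold invariantly on every call A's code makes (a < n follows
-- from exp(a,k) < n there), and where they fail the Python loop does not terminate (k ≤ 0)
def pvDblLoop (n k a : Int) : Int :=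
  if h : pvExp a k < n ∧ 1 ≤ a ∧ 1 ≤ k ∧ a < n then pvDblLoop n k (2 * a) else a
termination_by (n - a).toNat
decreasing_by omega

def tiene_raiz_entera (n : Int) (k : Int) : Bool :=
  if n ≤ 3 then false
  else
    let a := pvDblLoop n k 1
    pvIntervalo n k (PySem.Int.floordiv a 2) a

-- ===== PORT B =====
-- Source B's while-loop over (r, b); the guard 0 < b (Python: b ≠ 0) only makes the recursion
-- well-founded: b is a power of two throughout, so the two conditions agree on every call
def pvBitLoop (n : Int) (K : Nat) (r b : Int) : Int :=
  if _h : 0 < b then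
    pvBitLoop n K (if (r + b) ^ K ≤ n then r + b else r) (PySem.Int.floordiv b 2)
  else r
termination_by b.toNat
decreasing_by
  have h2 : PySem.Int.floordiv b 2 = b / 2 := PySem.Int.floordiv_eq_ediv_of_pos (by omega)
  rw [h2]; omega

def tiene_raiz_entera_alt (n : Int) (k : Int) : Bool :=
  if n ≤ 3 ∨ k ≤ 0 then false
  else decide ((pvBitLoop n k.toNat 0 ((2 : Int) ^ PySem.Int.bitLength n)) ^ k.toNat = n)

-- ===== PRECONDITION & SPEC =====
-- Pre_ excludes exactly the inputs with n > 3 and k ≤ 0, on which A's doubling loop never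
-- terminates (exp(a,k) = 1 < n forever); A returns a value on an input iff Pre_ holds.
def Pre_tiene_raiz_entera (n : Int) (k : Int) : Prop := n ≤ 3 ∨ 1 ≤ k
instance (n : Int) (k : Int) : Decidable (Pre_tiene_raiz_entera n k) := by unfold Pre_tiene_raiz_entera; infer_instance
def pvWitness_tiene_raiz_entera : Int × Int := (32, 5)
def Spec_tiene_raiz_entera (n : Int) (k : Int) (out : Bool) : Prop := out = tiene_raiz_entera_alt n k
instance (n : Int) (k : Int) (out : Bool) : Decidable (Spec_tiene_raiz_entera n k out) := by unfold Spec_tiene_raiz_entera; infer_instance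

-- ===== CLAIM (what is proved, stated in full; the proofs are below) =====
def Claim_equal_tiene_raiz_entera : Prop := ∀ (n : Int) (k : Int), Dom_tiene_raiz_entera n k → Pre_tiene_raiz_entera n k → Spec_tiene_raiz_entera n k (tiene_raiz_entera n k)

-- ===== LEMMAS AND PROOFS =====

theorem pvExpLoop_eq (b : Int) (hb : 0 ≤ b) (res pot : Int) :
    pvExpLoop res pot b = res * pot ^ b.toNat := by
  rw [pvExpLoop]
  by_cases h : 0 < b
  · rw [dif_pos h]
    have h2 : PySem.Int.floordiv b 2 = b / 2 := PySem.Int.floordiv_eq_ediv_of_pos (by omega)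
    have hm : PySem.Int.mod b 2 = b % 2 := PySem.Int.mod_eq_emod_of_pos (by omega)
    rw [h2, hm, pvExpLoop_eq (b / 2) (by omega)]
    by_cases ho : b % 2 = 1
    · rw [if_pos ho]
      have e1 : b.toNat = 2 * (b / 2).toNat + 1 := by omega
      rw [e1, pow_add, pow_mul, pow_one, pow_two]; ring
    · rw [if_neg ho]
      have e1 : b.toNat = 2 * (b / 2).toNat := by omega
      rw [e1, pow_mul, pow_two]
  · rw [dif_neg h]
    have hb0 : b = 0 := by omega
    subst hb0; simp
termination_by b.toNat
decreasing_by omega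

theorem pvExp_eq (a b : Int) (hb : 0 ≤ b) : pvExp a b = a ^ b.toNat := by
  unfold pvExp
  by_cases h : b = 0
  · subst h; simp
  · rw [if_neg h, pvExpLoop_eq b hb, one_mul]

theorem pvExp_self_le {a k : Int} (ha : 1 ≤ a) (hk : 1 ≤ k) : a ≤ pvExp a k := by
  rw [pvExp_eq a k (by omega)]
  exact le_self_pow₀ ha (by omega)

theorem pvDblLoop_spec (n k : Int) (hk1 : 1 ≤ k) (a : Int) (ha : 1 ≤ a) :
    1 ≤ pvDblLoop n k a ∧ n ≤ pvExp (pvDblLoop n k a) k ∧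
      (pvDblLoop n k a = a ∨
        (1 ≤ PySem.Int.floordiv (pvDblLoop n k a) 2 ∧
          pvExp (PySem.Int.floordiv (pvDblLoop n k a) 2) k < n)) := by
  rw [pvDblLoop]
  by_cases h : pvExp a k < n
  · have hlt : a < n := lt_of_le_of_lt (pvExp_self_le ha hk1) h
    rw [dif_pos ⟨h, ha, hk1, hlt⟩]
    obtain ⟨H1, H2, H3⟩ := pvDblLoop_spec n k hk1 (2 * a) (by omega)
    refine ⟨H1, H2, Or.inr ?_⟩
    rcases H3 with He | Hd
    · rw [He]
      have hfd : PySem.Int.floordiv (2 * a) 2 = a := by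
        rw [PySem.Int.floordiv_eq_ediv_of_pos (by omega)]; omega
      rw [hfd]; exact ⟨ha, h⟩
    · exact Hd
  · have hnc : ¬(pvExp a k < n ∧ 1 ≤ a ∧ 1 ≤ k ∧ a < n) := fun hc => h hc.1
    rw [dif_neg hnc]
    exact ⟨ha, by omega, Or.inl rfl⟩
termination_by (n - a).toNat
decreasing_by omega

theorem pvIntervalo_spec (n k : Int) (hk1 : 1 ≤ k) (i j : Int) (hi : 1 ≤ i)
    (hlow : ∀ r : Int, 1 ≤ r → r < i → r ^ k.toNat < n)
    (hhigh : ∀ r : Int, j < r → n < r ^ k.toNat) :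
    (pvIntervalo n k i j = true ↔ ∃ r : Int, 1 ≤ r ∧ r ^ k.toNat = n) := by
  have hK : k.toNat ≠ 0 := by omega
  rw [pvIntervalo]
  by_cases hij : i ≤ j
  · rw [dif_pos hij]
    by_cases heq : i = j
    · rw [if_pos heq, pvExp_eq _ _ (by omega), decide_eq_true_iff]
      constructor
      · intro h; exact ⟨i, hi, h.symm⟩
      · rintro ⟨r, hr1, hrk⟩
        rcases lt_trichotomy r i with h1 | h1 | h1
        · have := hlow r hr1 h1; omega
        · rw [← h1, hrk]
        · have := hhigh r (heq ▸ h1); omega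
    · rw [if_neg heq]
      have hpb := PySem.Int.floordiv_two_mid_bounds (lo := i) (hi := j) hij
      dsimp only
      set p := PySem.Int.floordiv (i + j) 2 with hp
      have hp1 : 1 ≤ p := le_trans hi hpb.1
      rw [pvExp_eq p k (by omega)]
      by_cases hv : n = p ^ k.toNat
      · rw [if_pos hv]
        exact ⟨fun _ => ⟨p, hp1, hv.symm⟩, fun _ => rfl⟩
      · rw [if_neg hv]
        by_cases hvn : p ^ k.toNat < n
        · rw [if_pos hvn]
          apply pvIntervalo_spec n k hk1 (p + 1) j (by omega) _ hhigh
          intro r hr1 hr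
          have hrp : r ≤ p := by omega
          rcases eq_or_lt_of_le hrp with he | hl
          · rw [he]; exact hvn
          · have := pow_lt_pow_left₀ hl (by omega : (0:Int) ≤ r) hK
            omega
        · rw [if_neg hvn]
          apply pvIntervalo_spec n k hk1 i (p - 1) hi hlow
          intro r hr
          have hpr : p ≤ r := by omega
          rcases eq_or_lt_of_le hpr with he | hl
          · rw [← he]; omega
          · have := pow_lt_pow_left₀ hl (by omega : (0:Int) ≤ p) hK
            omega
  · rw [dif_neg hij]
    simp only [Bool.false_eq_true, false_iff]
    rintro ⟨r, hr1, hrk⟩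
    rcases lt_or_ge r i with h1 | h1
    · have := hlow r hr1 h1; omega
    · have := hhigh r (by omega); omega
termination_by (j - i).toNat
decreasing_by all_goals omega

theorem pvBitLoop_spec (n : Int) (K : Nat) (_hK : K ≠ 0) :
    ∀ (t : Nat) (r : Int), 0 ≤ r → r ^ K ≤ n → n < (r + 2 * 2 ^ t) ^ K →
      0 ≤ pvBitLoop n K r (2 ^ t) ∧ (pvBitLoop n K r (2 ^ t)) ^ K ≤ n ∧
        n < (pvBitLoop n K r (2 ^ t) + 1) ^ K := by
  intro t
  induction t with
  | zero =>
    intro r hr hle hgt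
    rw [pvBitLoop, dif_pos (by norm_num : (0:Int) < 2 ^ 0)]
    have hfd : PySem.Int.floordiv ((2:Int) ^ (0:Nat)) 2 = 0 := by
      rw [PySem.Int.floordiv_eq_ediv_of_pos (by norm_num)]; norm_num
    rw [hfd, pvBitLoop, dif_neg (by norm_num)]
    have h20 : ((2:Int) ^ (0:Nat)) = 1 := by norm_num
    rw [h20]
    have hgt' : n < (r + 1 + 1) ^ K := by
      have e : r + 2 * 2 ^ (0:Nat) = r + 1 + 1 := by ring
      rw [e] at hgt; exact hgt
    by_cases h : (r + 1) ^ K ≤ n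
    · rw [if_pos h]; exact ⟨by omega, h, hgt'⟩
    · rw [if_neg h]; exact ⟨hr, hle, by omega⟩
  | succ t ih =>
    intro r hr hle hgt
    rw [pvBitLoop, dif_pos (by positivity : (0:Int) < 2 ^ (t + 1))]
    have hfd : PySem.Int.floordiv ((2:Int) ^ (t + 1)) 2 = 2 ^ t := by
      rw [PySem.Int.floordiv_eq_ediv_of_pos (by norm_num), pow_succ]
      exact Int.mul_ediv_cancel _ (by norm_num)
    rw [hfd]
    by_cases h : (r + 2 ^ (t + 1)) ^ K ≤ n
    · rw [if_pos h]
      apply ih (r + 2 ^ (t + 1))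
        (by have := pow_pos (show (0:Int) < 2 by norm_num) (t + 1); omega) h
      have e : r + 2 ^ (t + 1) + 2 * 2 ^ t = r + 2 * 2 ^ (t + 1) := by
        rw [pow_succ]; ring
      rw [e]; exact hgt
    · rw [if_neg h]
      apply ih r hr hle
      have e : r + 2 * 2 ^ t = r + 2 ^ (t + 1) := by rw [pow_succ]; ring
      rw [e]; omega

-- ===== VERDICT (by name: the statement is the Claim_ definition above) =====
theorem tiene_raiz_entera_spec : Claim_equal_tiene_raiz_entera := by
  intro n k _ hpre
  unfold Spec_tiene_raiz_entera
  by_cases hn : n ≤ 3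
  · simp [tiene_raiz_entera, tiene_raiz_entera_alt, hn]
  · have hk : 1 ≤ k := by unfold Pre_tiene_raiz_entera at hpre; omega
    have hn3 : 3 < n := by omega
    have hK : k.toNat ≠ 0 := by omega
    -- B side: the bit loop computes the floor k-th root R
    have hb0 : n < (2:Int) ^ PySem.Int.bitLength n := by
      have h := PySem.Int.lt_two_pow_bitLength n
      have h2 : ((n.natAbs : Int)) < (2:Int) ^ PySem.Int.bitLength n := by exact_mod_cast h
      exact lt_of_le_of_lt Int.le_natAbs h2
    have hpw : (0:Int) < 2 ^ PySem.Int.bitLength n :=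
      pow_pos (by norm_num) _
    have hinit : n < ((0:Int) + 2 * 2 ^ PySem.Int.bitLength n) ^ k.toNat := by
      have h1 : (1:Int) ≤ 2 * 2 ^ PySem.Int.bitLength n := by omega
      have h2 := le_self_pow₀ h1 hK
      rw [zero_add]; omega
    obtain ⟨hr0, hrle, hrgt⟩ :=
      pvBitLoop_spec n k.toNat hK (PySem.Int.bitLength n) 0 le_rfl
        (by rw [zero_pow hK]; omega) hinit
    set R := pvBitLoop n k.toNat 0 ((2:Int) ^ PySem.Int.bitLength n) with hR
    -- A side: doubling then binary search
    unfold tiene_raiz_entera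
    rw [if_neg (by omega)]
    obtain ⟨hA1, hA2, hA3⟩ := pvDblLoop_spec n k hk 1 le_rfl
    set A := pvDblLoop n k 1 with hA
    rcases hA3 with hAe | ⟨hA21, hA2lt⟩
    · exfalso
      rw [hAe, pvExp_eq 1 k (by omega), one_pow] at hA2
      omega
    · rw [pvExp_eq _ _ (by omega)] at hA2 hA2lt
      have hiff := pvIntervalo_spec n k hk (PySem.Int.floordiv A 2) A hA21
        (fun r hr1 hr => by
          have := pow_lt_pow_left₀ hr (by omega : (0:Int) ≤ r) hK
          omega)
        (fun r hr => by
          have := pow_lt_pow_left₀ hr (by omega : (0:Int) ≤ A) hK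
          omega)
      unfold tiene_raiz_entera_alt
      rw [if_neg (by omega), ← hR, Bool.eq_iff_iff, hiff, decide_eq_true_iff]
      constructor
      · rintro ⟨r, hr1, hrk⟩
        have hrR : r = R := by
          by_contra hne
          rcases lt_or_gt_of_ne hne with hl | hg
          · have := pow_lt_pow_left₀ hl (by omega : (0:Int) ≤ r) hK
            omega
          · have hR1 : R + 1 ≤ r := by omega
            have := pow_le_pow_left₀ (by omega : (0:Int) ≤ R + 1) hR1 k.toNat
            omega
        rw [← hrR]; exact hrk
      · intro h
        refine ⟨R, ?_, h⟩
        by_contra hR1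
        have hR0 : R = 0 := by omega
        rw [hR0, zero_pow hK] at h
        omega
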